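-- pv_equiv track=rewrite | github.com/Cornelii/TIL | Algorithms_and_DataStructure/algorithm_probs/SWEA/p1974. 수도쿠검증/Solution.py | rectangle_check
-- ===== SOURCE A (Python) =====
-- def  rectangle_check(A):
--     for row in range(0,9,3):
--         for col in range(0,9,3):
--             result=0
--             for idx in range(3):
--                 result+=sum(A[row+idx][col:col+3])
--             if  result!=45:
--                 return 0
--     return 1
-- ===== SOURCE B (Python) =====
-- def rectangle_check(A):
--     sums = [0] * 9
--     for r, row in enumerate(A[:9]):
--         for c, v in enumerate(row[:9]):
--             sums[(r // 3) * 3 + c // 3] += v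
--     return int(all(s == 45 for s in sums))
-- ===== Notes on version B (the rewrite author's own statement) =====
-- stated objective: alternative
-- what changed: B replaces A's box-by-box nested loops with early return by a single row-major pass over the cells that maintains an array of all nine box accumulators indexed by (r//3)*3 + c//3, followed by one all()-check at the end.
import Mathlib
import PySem

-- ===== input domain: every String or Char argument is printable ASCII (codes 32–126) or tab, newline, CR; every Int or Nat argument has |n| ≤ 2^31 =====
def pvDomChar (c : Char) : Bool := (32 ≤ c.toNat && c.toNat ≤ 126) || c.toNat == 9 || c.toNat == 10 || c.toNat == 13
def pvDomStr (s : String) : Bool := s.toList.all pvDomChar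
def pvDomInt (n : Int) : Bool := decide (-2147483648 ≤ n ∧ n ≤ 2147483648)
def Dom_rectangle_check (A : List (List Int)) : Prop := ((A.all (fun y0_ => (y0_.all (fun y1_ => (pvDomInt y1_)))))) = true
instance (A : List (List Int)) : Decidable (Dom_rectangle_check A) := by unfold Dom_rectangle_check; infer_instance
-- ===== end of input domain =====

-- B makes one row-major pass over the cells, accumulating all nine box sums in an array
-- indexed by (r//3)*3 + c//3 and checking them all at the end, instead of A's box-by-box
-- nested loops with an early return (alternative decomposition, same cost).

-- ===== PORT A =====
-- sum(A[row+idx][col:col+3]) accumulated over idx in range(3); indexing totalized with getD []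
-- (Pre_ excludes exactly the inputs where the Python raises IndexError).
def pvBoxA (A : List (List Int)) (row col : Int) : Int :=
  (PySem.List.pyRange 0 3 1).foldl
    (fun result idx =>
      result + (PySem.List.slice ((PySem.List.pyGet? A (row + idx)).getD []) (some col) (some (col + 3))).sum) 0

-- the two nested 'for row/col in range(0,9,3)' loops with early 'return 0', flattened in order
def pvGoA (A : List (List Int)) : List (Int × Int) → Int
  | [] => 1
  | (r, c) :: rest => if pvBoxA A r c ≠ 45 then 0 else pvGoA A rest

def rectangle_check (A : List (List Int)) : Int :=
  pvGoA A ((PySem.List.pyRange 0 9 3).flatMap (fun r => (PySem.List.pyRange 0 9 3).map (fun c => (r, c))))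

-- ===== PORT B =====
-- sums[(r//3)*3 + c//3] += v; the enumerate indices are ≥ 0, so .toNat is exact here
def pvCellStep (sums : List Int) (r c v : Int) : List Int :=
  sums.modify ((PySem.Int.floordiv r 3 * 3 + PySem.Int.floordiv c 3).toNat) (· + v)

-- 'for c, v in enumerate(row[:9]): sums[(r//3)*3 + c//3] += v'
def pvRowB (sums : List Int) (r : Int) (row : List Int) : List Int :=
  (PySem.List.enumerate (PySem.List.slice row none (some 9)) 0).foldl
    (fun sums cp => pvCellStep sums r cp.1 cp.2) sums

-- 'sums = [0]*9; for r, row in enumerate(A[:9]): …'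
def pvSumsB (A : List (List Int)) : List Int :=
  (PySem.List.enumerate (PySem.List.slice A none (some 9)) 0).foldl
    (fun sums rp => pvRowB sums rp.1 rp.2) (List.replicate 9 0)

-- 'return int(all(s == 45 for s in sums))'
def rectangle_check_alt (A : List (List Int)) : Int :=
  if (pvSumsB A).all (fun s => s == 45) then 1 else 0

-- ===== PRECONDITION & SPEC =====
-- helper for Pre_ only: the sum of the 3x3 box whose top-left cell is (r,c), rows read totally
def pvBoxSum (A : List (List Int)) (r c : Nat) : Int :=
  (((A.getD r []).drop c).take 3).sum + (((A.getD (r + 1) []).drop c).take 3).sum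
    + (((A.getD (r + 2) []).drop c).take 3).sum

-- Pre_ holds exactly when the Python A returns (otherwise it raises IndexError): either the board
-- has at least 9 rows, or A early-returns 0 at band 0 (needs 3 rows) or band 1 (needs 6 rows)
-- because some box of that band does not sum to 45.
def Pre_rectangle_check (A : List (List Int)) : Prop :=
  9 ≤ A.length
    ∨ (3 ≤ A.length ∧ ¬(pvBoxSum A 0 0 = 45 ∧ pvBoxSum A 0 3 = 45 ∧ pvBoxSum A 0 6 = 45))
    ∨ (6 ≤ A.length ∧ ¬(pvBoxSum A 3 0 = 45 ∧ pvBoxSum A 3 3 = 45 ∧ pvBoxSum A 3 6 = 45))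
instance (A : List (List Int)) : Decidable (Pre_rectangle_check A) := by
  unfold Pre_rectangle_check; infer_instance

def pvWitness_rectangle_check : List (List Int) :=
  [[5,5,5,5,5,5,5,5,5],[5,5,5,5,5,5,5,5,5],[5,5,5,5,5,5,5,5,5],
   [5,5,5,5,5,5,5,5,5],[5,5,5,5,5,5,5,5,5],[5,5,5,5,5,5,5,5,5],
   [5,5,5,5,5,5,5,5,5],[5,5,5,5,5,5,5,5,5],[5,5,5,5,5,5,5,5,5]]

def Spec_rectangle_check (A : List (List Int)) (out : Int) : Prop := out = rectangle_check_alt A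
instance (A : List (List Int)) (out : Int) : Decidable (Spec_rectangle_check A out) := by
  unfold Spec_rectangle_check; infer_instance

-- ===== CLAIM (what is proved, stated in full; the proofs are below) =====
def Claim_equal_rectangle_check : Prop :=
  ∀ (A : List (List Int)), Dom_rectangle_check A → Pre_rectangle_check A →
    Spec_rectangle_check A (rectangle_check A)

-- ===== LEMMAS AND PROOFS =====

-- two += at the same slot merge into one
theorem pvModify_modify (s : List Int) (i : Nat) (a b : Int) :
    (s.modify i (· + a)).modify i (· + b) = s.modify i (· + (a + b)) := by
  induction s generalizing i with
  | nil => simp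
  | cons x xs ih => cases i with
    | zero => simp [List.modify_cons]; ring
    | succ n => simp [ih]

-- += 0 is a no-op
theorem pvModify_id (s : List Int) (i : Nat) : s.modify i (fun x => x) = s := by
  induction s generalizing i with
  | nil => simp
  | cons x xs ih => cases i with
    | zero => simp [List.modify_cons]
    | succ n => simp [ih]

-- one row of B's pass bumps the band's three accumulators by the row's three chunk sums
set_option maxHeartbeats 1000000 in
theorem pvRowB_eq (sums : List Int) (r : Int) (hr : 0 ≤ r) (row : List Int) :
    pvRowB sums r row =
      ((sums.modify (r / 3 * 3).toNat
          (· + (PySem.List.slice row (some 0) (some 3)).sum)).modify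
        ((r / 3 * 3).toNat + 1)
          (· + (PySem.List.slice row (some 3) (some 6)).sum)).modify
        ((r / 3 * 3).toNat + 2)
          (· + (PySem.List.slice row (some 6) (some 9)).sum) := by
  have h1 : (r / 3 * 3 + 1).toNat = (r / 3 * 3).toNat + 1 := by omega
  have h2 : (r / 3 * 3 + 2).toNat = (r / 3 * 3).toNat + 2 := by omega
  have f1 : PySem.Int.floordiv 1 3 = 0 := by decide
  have f2 : PySem.Int.floordiv 2 3 = 0 := by decide
  have f3 : PySem.Int.floordiv 3 3 = 1 := by decide
  have f4 : PySem.Int.floordiv 4 3 = 1 := by decide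
  have f5 : PySem.Int.floordiv 5 3 = 1 := by decide
  have f6 : PySem.Int.floordiv 6 3 = 2 := by decide
  have f7 : PySem.Int.floordiv 7 3 = 2 := by decide
  have f8 : PySem.Int.floordiv 8 3 = 2 := by decide
  unfold pvRowB
  rw [PySem.List.slice_to _ (by norm_num)]
  rcases row with _ | ⟨v0, _ | ⟨v1, _ | ⟨v2, _ | ⟨v3, _ | ⟨v4, _ | ⟨v5, _ | ⟨v6, _ | ⟨v7, _ | ⟨v8, t⟩⟩⟩⟩⟩⟩⟩⟩⟩ <;>
    simp [PySem.List.enumerate_cons, PySem.List.enumerate_nil, pvCellStep,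
      f1, f2, f3, f4, f5, f6, f7, f8, h1, h2] <;>
    simp [PySem.List.slice] <;>
    norm_num [pvModify_modify, pvModify_id] <;>
    repeat' first
      | rfl
      | (funext x; ring)
      | congr 1

-- B's accumulator array ends up holding exactly A's nine box sums, in box order
set_option maxHeartbeats 2000000 in
theorem pvSums_eq (A : List (List Int)) :
    pvSumsB A = [pvBoxA A 0 0, pvBoxA A 0 3, pvBoxA A 0 6,
                 pvBoxA A 3 0, pvBoxA A 3 3, pvBoxA A 3 6,
                 pvBoxA A 6 0, pvBoxA A 6 3, pvBoxA A 6 6] := by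
  have hR3 : PySem.List.pyRange 0 3 1 = [0, 1, 2] := by decide
  have g0 : ∀ xs : List (List Int), PySem.List.pyGet? xs 0 = xs[(0:Nat)]? := fun xs => by
    rw [show (0:Int) = ((0:Nat):Int) by norm_num, PySem.List.pyGet?_natCast]
  have g1 : ∀ xs : List (List Int), PySem.List.pyGet? xs 1 = xs[(1:Nat)]? := fun xs => by
    rw [show (1:Int) = ((1:Nat):Int) by norm_num, PySem.List.pyGet?_natCast]
  have g2 : ∀ xs : List (List Int), PySem.List.pyGet? xs 2 = xs[(2:Nat)]? := fun xs => by
    rw [show (2:Int) = ((2:Nat):Int) by norm_num, PySem.List.pyGet?_natCast]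
  have g3 : ∀ xs : List (List Int), PySem.List.pyGet? xs 3 = xs[(3:Nat)]? := fun xs => by
    rw [show (3:Int) = ((3:Nat):Int) by norm_num, PySem.List.pyGet?_natCast]
  have g4 : ∀ xs : List (List Int), PySem.List.pyGet? xs 4 = xs[(4:Nat)]? := fun xs => by
    rw [show (4:Int) = ((4:Nat):Int) by norm_num, PySem.List.pyGet?_natCast]
  have g5 : ∀ xs : List (List Int), PySem.List.pyGet? xs 5 = xs[(5:Nat)]? := fun xs => by
    rw [show (5:Int) = ((5:Nat):Int) by norm_num, PySem.List.pyGet?_natCast]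
  have g6 : ∀ xs : List (List Int), PySem.List.pyGet? xs 6 = xs[(6:Nat)]? := fun xs => by
    rw [show (6:Int) = ((6:Nat):Int) by norm_num, PySem.List.pyGet?_natCast]
  have g7 : ∀ xs : List (List Int), PySem.List.pyGet? xs 7 = xs[(7:Nat)]? := fun xs => by
    rw [show (7:Int) = ((7:Nat):Int) by norm_num, PySem.List.pyGet?_natCast]
  have g8 : ∀ xs : List (List Int), PySem.List.pyGet? xs 8 = xs[(8:Nat)]? := fun xs => by
    rw [show (8:Int) = ((8:Nat):Int) by norm_num, PySem.List.pyGet?_natCast]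
  unfold pvSumsB
  rw [PySem.List.slice_to _ (by norm_num)]
  rcases A with _ | ⟨r0, _ | ⟨r1, _ | ⟨r2, _ | ⟨r3, _ | ⟨r4, _ | ⟨r5, _ | ⟨r6, _ | ⟨r7, _ | ⟨r8, t⟩⟩⟩⟩⟩⟩⟩⟩⟩ <;>
    all_goals (
      simp only [show ((9:Int).toNat) = 9 from rfl, List.take_succ_cons, List.take_nil, List.take_zero,
        PySem.List.enumerate_cons, PySem.List.enumerate_nil, List.foldl_cons, List.foldl_nil]
      repeat rw [pvRowB_eq _ _ (by norm_num)]
      norm_num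
      norm_num [pvBoxA, hR3, g0, g1, g2, g3, g4, g5, g6, g7, g8,
        List.replicate, List.modify_cons, PySem.List.slice]
      try simp only [show Int.toNat 0 = 0 from rfl, show Int.toNat 1 = 1 from rfl,
        show Int.toNat 2 = 2 from rfl, show Int.toNat 3 = 3 from rfl, show Int.toNat 4 = 4 from rfl,
        show Int.toNat 5 = 5 from rfl, show Int.toNat 6 = 6 from rfl, show Int.toNat 7 = 7 from rfl,
        show Int.toNat 9 = 9 from rfl]
      try simp)

-- A's early-return chain over a list of box coordinates is the all-boxes-sum-45 test
theorem pvChain_eq_all (A : List (List Int)) (cs : List (Int × Int)) :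
    pvGoA A cs = if cs.all (fun p => pvBoxA A p.1 p.2 == 45) then 1 else 0 := by
  induction cs with
  | nil => simp [pvGoA]
  | cons c rest ih =>
    rcases c with ⟨r, c⟩
    rw [pvGoA]
    by_cases h : pvBoxA A r c = 45
    · rw [ih]
      by_cases hr : rest.all (fun p => pvBoxA A p.1 p.2 == 45) <;> simp [hr, h]
    · simp [h]

theorem ports_eq (A : List (List Int)) : rectangle_check A = rectangle_check_alt A := by
  have hc : ((PySem.List.pyRange 0 9 3).flatMap (fun r => (PySem.List.pyRange 0 9 3).map (fun c => (r, c))))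
      = [((0:Int),(0:Int)),(0,3),(0,6),(3,0),(3,3),(3,6),(6,0),(6,3),(6,6)] := by decide
  rw [rectangle_check, hc, pvChain_eq_all, rectangle_check_alt, pvSums_eq]
  simp

-- ===== VERDICT (by name: the statement is the Claim_ definition above) =====
theorem rectangle_check_spec : Claim_equal_rectangle_check := by
  intro A _ _
  exact ports_eq A
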